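-- pv_equiv track=rewrite | github.com/mtblackman16/quest-craft | scripts/split_artwork.py | find_regions_1d
-- ===== SOURCE A (Python) =====
-- def find_regions_1d(has_content, gap_threshold):
--     """Find contiguous regions in a 1D boolean array, splitting on gaps >= threshold."""
--     regions = []
--     in_region = False
--     start = 0
--
--     for i, val in enumerate(has_content):
--         if val and not in_region:
--             start = i
--             in_region = True
--         elif not val and in_region:
--             regions.append((start, i))
--             in_region = False
--
--     if in_region:
--         regions.append((start, len(has_content)))
--
--     # Merge regions with small gaps
--     if len(regions) <= 1:
--         return regions
--
--     merged = [regions[0]]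
--     for start, end in regions[1:]:
--         prev_start, prev_end = merged[-1]
--         if start - prev_end < gap_threshold:
--             merged[-1] = (prev_start, end)
--         else:
--             merged.append((start, end))
--
--     return merged
-- ===== SOURCE B (Python) =====
-- def find_regions_1d(has_content, gap_threshold):
--     """Single-pass scan: absorb gaps shorter than gap_threshold while scanning,
--     so no intermediate raw-region list is ever built."""
--     out = []
--     open_start = None
--     last_end = 0
--     for i, val in enumerate(has_content):
--         if val:
--             if open_start is None:
--                 open_start = i
--             elif i > last_end and i - last_end >= gap_threshold:
--                 out.append((open_start, last_end))
--                 open_start = i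
--             last_end = i + 1
--     if open_start is not None:
--         out.append((open_start, last_end))
--     return out
-- ===== Notes on version B (the rewrite author's own statement) =====
-- stated objective: alternative
-- what changed: Replaced A's two-phase approach (build a raw-region list with a state-machine scan, then a second fold over that list merging small gaps) by a single fused scan that keeps (output, open merged-region start, last content end) and decides merge-vs-close at each content cell, never materialising the raw-region list.
import Mathlib
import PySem

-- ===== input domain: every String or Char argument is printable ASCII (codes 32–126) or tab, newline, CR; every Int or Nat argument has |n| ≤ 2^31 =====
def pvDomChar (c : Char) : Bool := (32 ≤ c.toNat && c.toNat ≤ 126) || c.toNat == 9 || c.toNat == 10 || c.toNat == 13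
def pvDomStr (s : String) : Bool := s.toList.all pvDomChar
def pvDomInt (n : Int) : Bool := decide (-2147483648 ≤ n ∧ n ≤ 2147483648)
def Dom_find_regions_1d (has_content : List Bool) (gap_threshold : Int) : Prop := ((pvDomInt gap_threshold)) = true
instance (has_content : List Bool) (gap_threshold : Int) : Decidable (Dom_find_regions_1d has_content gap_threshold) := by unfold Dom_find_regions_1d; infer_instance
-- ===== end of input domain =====

-- B fuses A's two passes (raw region detection, then gap merging over the region list)
-- into a single scan that never builds the raw-region list; objective: alternative (same cost).

-- ===== PORT A =====
-- the enumerate loop: state = (regions, in_region, start)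
def aScanStep (st : List (Int × Int) × Bool × Int) (p : Int × Bool) :
    List (Int × Int) × Bool × Int :=
  if p.2 && !st.2.1 then (st.1, true, p.1)
  else if !p.2 && st.2.1 then (st.1 ++ [(st.2.2, p.1)], false, st.2.2)
  else st

-- the merge loop body: reads merged[-1], either rewrites it or appends
def aMergeStep (g : Int) (merged : List (Int × Int)) (r : Int × Int) : List (Int × Int) :=
  match merged.getLast? with
  | none => merged ++ [r]
  | some (ps, pe) => if r.1 - pe < g then merged.dropLast ++ [(ps, r.2)] else merged ++ [r]

def find_regions_1d (has_content : List Bool) (gap_threshold : Int) : List (Int × Int) :=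
  let st := (PySem.List.enumerate has_content 0).foldl aScanStep ([], false, 0)
  let regions := if st.2.1 then st.1 ++ [(st.2.2, (has_content.length : Int))] else st.1
  if regions.length ≤ 1 then regions
  else
    match regions with
    | [] => regions
    | r0 :: rest => rest.foldl (aMergeStep gap_threshold) [r0]

-- ===== PORT B =====
-- single-pass state = (out, open_start, last_end)
def bStep (g : Int) (st : List (Int × Int) × Option Int × Int) (p : Int × Bool) :
    List (Int × Int) × Option Int × Int :=
  if p.2 then
    match st.2.1 with
    | none => (st.1, some p.1, p.1 + 1)
    | some s =>
        if p.1 > st.2.2 ∧ p.1 - st.2.2 ≥ g then (st.1 ++ [(s, st.2.2)], some p.1, p.1 + 1)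
        else (st.1, some s, p.1 + 1)
  else st

def find_regions_1d_alt (has_content : List Bool) (gap_threshold : Int) : List (Int × Int) :=
  let st := (PySem.List.enumerate has_content 0).foldl (bStep gap_threshold) ([], none, 0)
  match st.2.1 with
  | none => st.1
  | some s => st.1 ++ [(s, st.2.2)]

-- ===== PRECONDITION & SPEC =====
def Spec_find_regions_1d (has_content : List Bool) (gap_threshold : Int) (out : List (Int × Int)) : Prop := out = find_regions_1d_alt has_content gap_threshold
instance (has_content : List Bool) (gap_threshold : Int) (out : List (Int × Int)) : Decidable (Spec_find_regions_1d has_content gap_threshold out) := by unfold Spec_find_regions_1d; infer_instance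

-- ===== CLAIM (what is proved, stated in full; the proofs are below) =====
def Claim_equal_find_regions_1d : Prop := ∀ (has_content : List Bool) (gap_threshold : Int), Dom_find_regions_1d has_content gap_threshold → Spec_find_regions_1d has_content gap_threshold (find_regions_1d has_content gap_threshold)

-- ===== LEMMAS AND PROOFS =====

-- raw regions of the suffix `t` starting at absolute index `i`,
-- with `some s` = currently inside a raw region started at `s`
def raw : List Bool → Int → Option Int → List (Int × Int)
  | [], _, none => []
  | [], i, some s => [(s, i)]
  | true :: t, i, none => raw t (i+1) (some i)
  | true :: t, i, some s => raw t (i+1) (some s)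
  | false :: t, i, none => raw t (i+1) none
  | false :: t, i, some s => (s, i) :: raw t (i+1) none

-- A's merge loop, recursively: current merged region + remaining raw regions
def merge1 (g : Int) : Int × Int → List (Int × Int) → List (Int × Int)
  | cur, [] => [cur]
  | (ps, pe), (s, e) :: rest =>
      if s - pe < g then merge1 g (ps, e) rest else (ps, pe) :: merge1 g (s, e) rest

def mergeAll (g : Int) : List (Int × Int) → List (Int × Int)
  | [] => []
  | r :: rest => merge1 g r rest

-- B's scan, recursively: `some (s, le)` = open merged region (start s, last content end le)
def M (g : Int) : List Bool → Int → Option (Int × Int) → List (Int × Int)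
  | [], _, none => []
  | [], _, some (s, le) => [(s, le)]
  | false :: t, i, ost => M g t (i+1) ost
  | true :: t, i, none => M g t (i+1) (some (i, i+1))
  | true :: t, i, some (s, le) =>
      if i > le ∧ i - le ≥ g then (s, le) :: M g t (i+1) (some (i, i+1))
      else M g t (i+1) (some (s, i+1))

-- end of the current raw run / the raw regions after it
def runEnd : List Bool → Int → Int
  | [], i => i
  | true :: t, i => runEnd t (i+1)
  | false :: _, i => i

def rawRest : List Bool → Int → List (Int × Int)
  | [], _ => []
  | true :: t, i => rawRest t (i+1)
  | false :: t, i => raw t (i+1) none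

lemma raw_open (t : List Bool) : ∀ (i s : Int),
    raw t i (some s) = (s, runEnd t i) :: rawRest t i := by
  induction t with
  | nil => intro i s; simp [raw, runEnd, rawRest]
  | cons b t ih =>
    intro i s
    cases b <;> simp [raw, runEnd, rawRest, ih]

-- the heart: B's fused scan M equals A's merge1 over the raw regions
lemma key (g : Int) : ∀ t : List Bool,
    (∀ i s le : Int, le < i → M g t i (some (s, le)) = merge1 g (s, le) (raw t i none)) ∧
    (∀ i x : Int, M g t i (some (x, i)) = merge1 g (x, runEnd t i) (rawRest t i)) := by
  intro t
  induction t with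
  | nil =>
    constructor <;> intro i s <;> intros <;> simp [M, merge1, raw, runEnd, rawRest]
  | cons b t ih =>
    obtain ⟨ihA, ihB⟩ := ih
    cases b
    · refine ⟨?_, ?_⟩
      · intro i s le h
        simp only [M, raw]
        exact ihA (i+1) s le (by omega)
      · intro i x
        simp only [M, runEnd, rawRest]
        exact ihA (i+1) x i (by omega)
    · refine ⟨?_, ?_⟩
      · intro i s le h
        have hr : raw (true :: t) i none = (i, runEnd t (i+1)) :: rawRest t (i+1) := by
          simp [raw, raw_open]
        rw [hr]
        simp only [M, merge1]
        by_cases hc : i - le < g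
        · have hn : ¬ (i > le ∧ i - le ≥ g) := by omega
          simp [hc, hn, ihB (i+1) s]
        · have hy : i > le ∧ i - le ≥ g := by omega
          simp [hc, hy, ihB (i+1) i]
      · intro i x
        have hn : ¬ (i > i ∧ i - i ≥ g) := by omega
        simp only [M, runEnd, rawRest, hn]
        exact ihB (i+1) x

lemma M_none (g : Int) : ∀ (t : List Bool) (i : Int),
    M g t i none = mergeAll g (raw t i none) := by
  intro t
  induction t with
  | nil => intro i; simp [M, raw, mergeAll]
  | cons b t ih =>
    intro i
    cases b
    · simp only [M, raw, mergeAll]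
      exact ih (i+1)
    · simp only [M, raw, raw_open, mergeAll]
      exact (key g t).2 (i+1) i

-- A's scan loop (with the trailing-region finalisation) computes raw
lemma A_scan : ∀ (t : List Bool) (i : Int) (regs : List (Int × Int)) (inr : Bool) (st : Int),
    (if ((PySem.List.enumerate t i).foldl aScanStep (regs, inr, st)).2.1
     then ((PySem.List.enumerate t i).foldl aScanStep (regs, inr, st)).1 ++
          [(((PySem.List.enumerate t i).foldl aScanStep (regs, inr, st)).2.2, i + (t.length : Int))]
     else ((PySem.List.enumerate t i).foldl aScanStep (regs, inr, st)).1)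
    = regs ++ raw t i (if inr then some st else none) := by
  intro t
  induction t with
  | nil =>
    intro i regs inr st
    cases inr <;> simp [PySem.List.enumerate, raw]
  | cons b t ih =>
    intro i regs inr st
    have hlen : i + ((b :: t).length : Int) = (i + 1) + (t.length : Int) := by
      simp only [List.length_cons]; push_cast; omega
    rw [PySem.List.enumerate_cons, List.foldl_cons, hlen]
    cases b
    · cases inr
      · have hstep : aScanStep (regs, false, st) (i, false) = (regs, false, st) := by
          simp [aScanStep]
        rw [hstep]
        have h := ih (i+1) regs false st
        simp only [Bool.false_eq_true, if_false] at h ⊢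
        rw [h]
        rfl
      · have hstep : aScanStep (regs, true, st) (i, false) = (regs ++ [(st, i)], false, st) := by
          simp [aScanStep]
        rw [hstep]
        have h := ih (i+1) (regs ++ [(st, i)]) false st
        simp only [Bool.false_eq_true, if_false] at h
        rw [h]
        simp [raw]
    · cases inr
      · have hstep : aScanStep (regs, false, st) (i, true) = (regs, true, i) := by
          simp [aScanStep]
        rw [hstep]
        have h := ih (i+1) regs true i
        simp only [if_true] at h ⊢
        rw [h]
        rfl
      · have hstep : aScanStep (regs, true, st) (i, true) = (regs, true, st) := by
          simp [aScanStep]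
        rw [hstep]
        have h := ih (i+1) regs true st
        simp only [if_true] at h ⊢
        rw [h]
        rfl

-- A's merge loop equals merge1
lemma A_merge (g : Int) : ∀ (rest acc : List (Int × Int)) (cur : Int × Int),
    rest.foldl (aMergeStep g) (acc ++ [cur]) = acc ++ merge1 g cur rest := by
  intro rest
  induction rest with
  | nil => intro acc cur; simp [merge1]
  | cons r rest ih =>
    intro acc cur
    obtain ⟨s, e⟩ := r
    obtain ⟨ps, pe⟩ := cur
    rw [List.foldl_cons]
    have hstep : aMergeStep g (acc ++ [(ps, pe)]) (s, e) =
        if s - pe < g then acc ++ [(ps, e)] else (acc ++ [(ps, pe)]) ++ [(s, e)] := by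
      simp [aMergeStep]
    rw [hstep]
    by_cases hc : s - pe < g
    · simp only [if_pos hc]
      rw [ih acc (ps, e)]
      simp [merge1, hc]
    · simp only [if_neg hc]
      rw [ih (acc ++ [(ps, pe)]) (s, e)]
      simp [merge1, hc]

lemma A_eq (l : List Bool) (g : Int) :
    find_regions_1d l g = mergeAll g (raw l 0 none) := by
  unfold find_regions_1d
  have hscan := A_scan l 0 [] false 0
  simp only [List.nil_append, if_neg Bool.false_ne_true] at hscan
  have hzero : (0 : Int) + (l.length : Int) = (l.length : Int) := by ring
  rw [hzero] at hscan
  simp only []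
  rw [hscan]
  rcases hraw : raw l 0 none with _ | ⟨r0, rest⟩
  · simp [mergeAll]
  · rcases rest with _ | ⟨r1, rest'⟩
    · obtain ⟨a, b⟩ := r0
      simp [mergeAll, merge1]
    · simp only [mergeAll]
      have := A_merge g (r1 :: rest') [] r0
      simpa using this

-- B's fold computes M
lemma B_fold (g : Int) : ∀ (t : List Bool) (i : Int) (acc : List (Int × Int))
    (o : Option Int) (le : Int),
    (match ((PySem.List.enumerate t i).foldl (bStep g) (acc, o, le)).2.1 with
     | none => ((PySem.List.enumerate t i).foldl (bStep g) (acc, o, le)).1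
     | some s => ((PySem.List.enumerate t i).foldl (bStep g) (acc, o, le)).1 ++
          [(s, ((PySem.List.enumerate t i).foldl (bStep g) (acc, o, le)).2.2)])
    = acc ++ M g t i (o.map (fun s => (s, le))) := by
  intro t
  induction t with
  | nil =>
    intro i acc o le
    cases o <;> simp [PySem.List.enumerate, M]
  | cons b t ih =>
    intro i acc o le
    rw [PySem.List.enumerate_cons, List.foldl_cons]
    cases b
    · have hstep : bStep g (acc, o, le) (i, false) = (acc, o, le) := by simp [bStep]
      rw [hstep, ih]
      cases o <;> simp [M]
    · cases o with
      | none =>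
        have hstep : bStep g (acc, none, le) (i, true) = (acc, some i, i + 1) := by
          simp [bStep]
        rw [hstep, ih]
        simp [M]
      | some s =>
        by_cases hc : i > le ∧ i - le ≥ g
        · have hstep : bStep g (acc, some s, le) (i, true) =
              (acc ++ [(s, le)], some i, i + 1) := by simp [bStep, hc]
          rw [hstep, ih]
          simp [M, hc]
        · have hstep : bStep g (acc, some s, le) (i, true) =
              (acc, some s, i + 1) := by simp [bStep, hc]
          rw [hstep, ih]
          simp [M, hc]

lemma B_eq (l : List Bool) (g : Int) :
    find_regions_1d_alt l g = M g l 0 none := by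
  unfold find_regions_1d_alt
  have := B_fold g l 0 [] none 0
  simpa using this

-- ===== VERDICT (by name: the statement is the Claim_ definition above) =====
theorem find_regions_1d_spec : Claim_equal_find_regions_1d := by
  intro l g _
  unfold Spec_find_regions_1d
  rw [A_eq, B_eq, M_none]
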